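-- pv_equiv track=rewrite | github.com/raeez/chiral-bar-cobar | compute/scripts/_archive/automorphic_bar.py | eta_power
-- ===== SOURCE A (Python) =====
-- from typing import Dict, List, Tuple
--
-- def eta_power(d: int, max_wt: int = 25) -> List[int]:
--     """Compute eta(tau)^d = q^{d/24} prod_{n>=1} (1-q^n)^d as q-series.
--
--     Returns coefficients ignoring the q^{d/24} prefactor.
--     """
--     coeffs = [0] * (max_wt + 1)
--     coeffs[0] = 1
--     for n in range(1, max_wt + 1):
--         # Multiply by (1-q^n)^d using accumulation in reverse
--         for _ in range(d):
--             for j in range(max_wt, n - 1, -1):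
--                 coeffs[j] -= coeffs[j - n]
--     return coeffs
-- ===== SOURCE B (Python) =====
-- from typing import List
--
--
-- def _mul(a: List[int], b: List[int]) -> List[int]:
--     """Truncated product of two q-series given to the same precision."""
--     return [sum(a[i] * b[k - i] for i in range(k + 1)) for k in range(len(a))]
--
--
-- def eta_power(d: int, max_wt: int = 25) -> List[int]:
--     """Compute eta(tau)^d = q^{d/24} prod_{n>=1} (1-q^n)^d as q-series.
--
--     Returns coefficients ignoring the q^{d/24} prefactor.
--     """
--     result = [1] + [0] * max_wt
--     if d <= 0:
--         return result  # empty product of factors: E(q)^d contributes nothing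
--     # E(q) = prod_{n=1}^{max_wt} (1 - q^n) truncated at q^max_wt
--     base = [1] + [0] * max_wt
--     for n in range(1, max_wt + 1):
--         base = [base[k] - (base[k - n] if k >= n else 0) for k in range(max_wt + 1)]
--     # result = E(q)^d by binary exponentiation
--     e = d
--     while e > 0:
--         if e & 1:
--             result = _mul(result, base)
--         base = _mul(base, base)
--         e >>= 1
--     return result
-- ===== Notes on version B (the rewrite author's own statement) =====
-- stated objective: faster
-- what changed: Instead of multiplying by (1-q^n) d separate times for each n (a d-fold inner repetition), B builds E = prod_{n<=max_wt}(1-q^n) once with a single subtraction pass per factor and then raises the truncated series E to the d-th power by binary exponentiation.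
-- outside the precondition, e.g. on eta_power(2, -1): A raises IndexError, B returns [1]
import Mathlib
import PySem

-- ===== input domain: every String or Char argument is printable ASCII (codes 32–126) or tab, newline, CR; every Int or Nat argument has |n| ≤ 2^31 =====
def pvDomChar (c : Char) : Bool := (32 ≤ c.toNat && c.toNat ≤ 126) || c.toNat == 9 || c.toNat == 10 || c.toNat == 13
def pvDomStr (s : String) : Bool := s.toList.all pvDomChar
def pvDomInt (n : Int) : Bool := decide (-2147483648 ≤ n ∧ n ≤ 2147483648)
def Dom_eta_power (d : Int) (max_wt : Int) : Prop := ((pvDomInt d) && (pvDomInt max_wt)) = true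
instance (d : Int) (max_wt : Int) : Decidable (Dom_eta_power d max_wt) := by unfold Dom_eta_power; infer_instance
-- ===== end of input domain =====

-- B replaces A's d-fold repeated subtraction per factor by computing E = prod (1-q^n) once
-- and raising it to the d-th power by binary exponentiation on truncated series (faster for large d).

-- ===== PORT A =====
def eta_power (d : Int) (max_wt : Int) : List Int :=
  -- coeffs = [0]*(max_wt+1); coeffs[0] = 1  (IndexError when max_wt < 0: excluded by Pre_)
  let coeffs : List Int := PySem.List.pySetD (List.replicate (max_wt + 1).toNat (0 : Int)) 0 1
  (PySem.List.pyRange 1 (max_wt + 1) 1).foldl (fun coeffs n =>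
    (PySem.List.pyRange 0 d 1).foldl (fun coeffs _ =>
      (PySem.List.pyRange max_wt (n - 1) (-1)).foldl (fun cs j =>
        PySem.List.pySetD cs j
          (PySem.List.pyGetD cs j 0 - PySem.List.pyGetD cs (j - n) 0)) coeffs) coeffs) coeffs

-- ===== PORT B =====
-- _mul(a, b): [sum(a[i]*b[k-i] for i in range(k+1)) for k in range(len(a))]
def pvMul (a b : List Int) : List Int :=
  (PySem.List.pyRange 0 (a.length : Int) 1).map (fun k =>
    ∑ i ∈ Finset.range (k.toNat + 1),
      PySem.List.pyGetD a (i : Int) 0 * PySem.List.pyGetD b (k - (i : Int)) 0)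

-- while e > 0: if e & 1: result = _mul(result, base); base = _mul(base, base); e >>= 1
def pvPowLoop (result base : List Int) (e : Int) : List Int :=
  if 0 < e then
    pvPowLoop (if PySem.Int.mod e 2 ≠ 0 then pvMul result base else result)
      (pvMul base base) (PySem.Int.floordiv e 2)
  else result
termination_by e.toNat
decreasing_by
  rw [PySem.Int.floordiv_eq_ediv_of_pos (by omega)]
  omega

def eta_power_alt (d : Int) (max_wt : Int) : List Int :=
  let result : List Int := 1 :: List.replicate max_wt.toNat 0
  if d ≤ 0 then result
  else
    let base : List Int := 1 :: List.replicate max_wt.toNat 0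
    let base := (PySem.List.pyRange 1 (max_wt + 1) 1).foldl (fun b n =>
      (PySem.List.pyRange 0 (max_wt + 1) 1).map (fun k =>
        PySem.List.pyGetD b k 0 - if n ≤ k then PySem.List.pyGetD b (k - n) 0 else 0)) base
    pvPowLoop result base d

-- ===== PRECONDITION & SPEC =====
-- Pre_ excludes max_wt < 0, on which A raises IndexError (coeffs[0] = 1 on the empty list).
def Pre_eta_power (d : Int) (max_wt : Int) : Prop := 0 ≤ max_wt
instance (d : Int) (max_wt : Int) : Decidable (Pre_eta_power d max_wt) := by
  unfold Pre_eta_power; infer_instance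
def pvWitness_eta_power : Int × Int := (3, 6)

def Spec_eta_power (d : Int) (max_wt : Int) (out : List Int) : Prop := out = eta_power_alt d max_wt
instance (d : Int) (max_wt : Int) (out : List Int) : Decidable (Spec_eta_power d max_wt out) := by
  unfold Spec_eta_power; infer_instance

-- ===== CLAIM (what is proved, stated in full; the proofs are below) =====
def Claim_equal_eta_power : Prop := ∀ (d : Int) (max_wt : Int), Dom_eta_power d max_wt → Pre_eta_power d max_wt → Spec_eta_power d max_wt (eta_power d max_wt)

-- ===== LEMMAS AND PROOFS =====

-- coefficient accessor: the k-th coefficient stored in a list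
def pvC (xs : List Int) (k : ℕ) : ℤ := xs.getD k 0

-- the product prod_{n=1}^{u} (1 - X^n) as a formal power series over ℤ
noncomputable def pvE (u : ℕ) : PowerSeries ℤ :=
  ∏ n ∈ Finset.Icc 1 u, (1 - (PowerSeries.X : PowerSeries ℤ) ^ n)

-- "xs represents the series f up to weight W"
def pvRep (W : ℕ) (xs : List Int) (f : PowerSeries ℤ) : Prop :=
  xs.length = W + 1 ∧ ∀ k : ℕ, k ≤ W → pvC xs k = PowerSeries.coeff (R := ℤ) k f

lemma pvRep_congr {W : ℕ} {xs : List Int} {f g : PowerSeries ℤ}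
    (h : pvRep W xs f) (e : f = g) : pvRep W xs g := e ▸ h

lemma pvGetD_map_range {f : ℕ → ℤ} {L k : ℕ} (hk : k < L) :
    ((List.range L).map f).getD k 0 = f k := by
  rw [List.getD_eq_getElem _ _ (by simpa using hk)]
  simp

lemma pvGetD_set (xs : List Int) (i : ℕ) (v : Int) (j : ℕ) (hj : j < xs.length) :
    (xs.set i v).getD j 0 = if j = i then v else xs.getD j 0 := by
  rw [List.getD_eq_getElem _ _ (by simpa using hj), List.getElem_set,
      List.getD_eq_getElem _ _ hj]
  by_cases hij : i = j
  · subst hij; simp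
  · rw [if_neg hij, if_neg (fun hh => hij hh.symm)]

-- coefficient of f * (1 - X^n)
lemma pvCoeff_mul_one_sub_X_pow (f : PowerSeries ℤ) (n k : ℕ) :
    PowerSeries.coeff (R := ℤ) k (f * (1 - PowerSeries.X ^ n)) =
      PowerSeries.coeff (R := ℤ) k f - if n ≤ k then PowerSeries.coeff (R := ℤ) (k - n) f else 0 := by
  rw [mul_sub, mul_one, map_sub, PowerSeries.coeff_mul_X_pow']

-- one application of the shared "multiply by (1 - q^n)" map step preserves representation
lemma pvStepRep (W : ℕ) (n : ℕ) (xs : List Int) (f : PowerSeries ℤ)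
    (h : pvRep W xs f) :
    pvRep W ((List.range xs.length).map (fun k =>
        xs.getD k 0 - if (n : Int) ≤ (k : Int) ∧ (k : Int) ≤ (W : Int) then xs.getD ((k : Int) - (n : Int)).toNat 0 else 0))
      (f * (1 - PowerSeries.X ^ n)) := by
  obtain ⟨hlen, hco⟩ := h
  simp only [pvC] at hco
  refine ⟨by simp [hlen], ?_⟩
  intro k hk
  have hkl : k < xs.length := by omega
  unfold pvC
  rw [pvGetD_map_range hkl, pvCoeff_mul_one_sub_X_pow]
  by_cases hnk : n ≤ k
  · rw [if_pos ⟨by exact_mod_cast hnk, by exact_mod_cast hk⟩, if_pos hnk]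
    have h1 : ((k : Int) - (n : Int)).toNat = k - n := by omega
    rw [h1, hco k hk, hco (k - n) (by omega)]
  · rw [if_neg (by omega), if_neg hnk, hco k hk]

-- A's descending in-place subtraction loop, extensionally
lemma pvDownLoop (n : Int) (hn : 1 ≤ n) :
    ∀ (m : ℕ) (a : Int) (xs : List Int), a + 1 - n = m → n - 1 ≤ a → a < (xs.length : Int) →
      (PySem.List.pyRange a (n - 1) (-1)).foldl (fun cs j =>
          PySem.List.pySetD cs j
            (PySem.List.pyGetD cs j 0 - PySem.List.pyGetD cs (j - n) 0)) xs =
        (List.range xs.length).map (fun k =>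
          xs.getD k 0 - if n ≤ (k : Int) ∧ (k : Int) ≤ a then xs.getD ((k : Int) - n).toNat 0 else 0) := by
  intro m
  induction m with
  | zero =>
    intro a xs hm ha hlen
    rw [PySem.List.pyRange_neg_one_eq_nil (by omega), List.foldl_nil]
    refine List.ext_getElem (by simp) ?_
    intro k hk1 hk2
    simp only [List.getElem_map, List.getElem_range]
    rw [if_neg (by omega), sub_zero, List.getD_eq_getElem _ _ hk1]
  | succ m ih =>
    intro a xs hm ha hlen
    have ha0 : 0 ≤ a := by omega
    rw [PySem.List.pyRange_neg_one_cons (by omega)]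
    simp only [List.foldl_cons]
    rw [PySem.List.pyGetD_of_nonneg xs 0 ha0, PySem.List.pyGetD_of_nonneg xs 0 (by omega : (0:Int) ≤ a - n),
        PySem.List.pySetD_of_nonneg xs _ ha0]
    set v : Int := xs.getD a.toNat 0 - xs.getD (a - n).toNat 0 with hv
    set xs' : List Int := xs.set a.toNat v with hxs'
    have hlen' : xs'.length = xs.length := by simp [hxs']
    rw [ih (a - 1) xs' (by omega) (by omega) (by omega)]
    refine List.ext_getElem (by simp [hlen']) ?_
    intro k hk1 hk2
    have hkxs : k < xs.length := by simp [hlen'] at hk1; omega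
    simp only [List.getElem_map, List.getElem_range]
    rw [pvGetD_set xs a.toNat v k hkxs]
    by_cases hka : k = a.toNat
    · rw [if_pos hka]
      have hkaI : (k : Int) = a := by omega
      rw [if_neg (by omega), if_pos (by omega), sub_zero, hv]
      have h1 : ((k : Int) - n).toNat = (a - n).toNat := by omega
      have h2 : k = a.toNat := hka
      rw [h1, h2]
    · rw [if_neg hka]
      have hkaI : (k : Int) ≠ a := by omega
      by_cases hc : n ≤ (k : Int) ∧ (k : Int) ≤ a - 1
      · rw [if_pos hc, if_pos (by omega)]
        rw [pvGetD_set xs a.toNat v _ (by omega)]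
        rw [if_neg (by omega)]
      · rw [if_neg hc, if_neg (by omega)]

-- the intermediate goal shapes for A’s loops, as explicit steps
lemma pvAStepRep (W : ℕ) (nI : Int) (h1 : 1 ≤ nI) (h2 : nI ≤ (W : Int))
    (xs : List Int) (f : PowerSeries ℤ) (h : pvRep W xs f) :
    pvRep W ((PySem.List.pyRange (W : Int) (nI - 1) (-1)).foldl (fun cs j =>
        PySem.List.pySetD cs j
          (PySem.List.pyGetD cs j 0 - PySem.List.pyGetD cs (j - nI) 0)) xs)
      (f * (1 - PowerSeries.X ^ nI.toNat)) := by
  obtain ⟨nn, rfl⟩ : ∃ nn : ℕ, nI = (nn : Int) := ⟨nI.toNat, (Int.toNat_of_nonneg (by omega)).symm⟩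
  rw [pvDownLoop (nn : Int) h1 ((W : Int) + 1 - nn).toNat (W : Int) xs (by omega) (by omega)
      (by rw [h.1]; push_cast; omega)]
  have := pvStepRep W nn xs f h
  simpa using this

lemma pvIterFold {α : Type} (F : α → α) (l : List Int) (init : α) :
    l.foldl (fun acc _ => F acc) init = F^[l.length] init := by
  induction l generalizing init with
  | nil => rfl
  | cons x t ih => simp [ih, Function.iterate_succ_apply]

lemma pvAIterRep (W : ℕ) (nI : Int) (h1 : 1 ≤ nI) (h2 : nI ≤ (W : Int)) :
    ∀ (t : ℕ) (xs : List Int) (f : PowerSeries ℤ), pvRep W xs f →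
    pvRep W ((fun cs => (PySem.List.pyRange (W : Int) (nI - 1) (-1)).foldl (fun cs j =>
        PySem.List.pySetD cs j
          (PySem.List.pyGetD cs j 0 - PySem.List.pyGetD cs (j - nI) 0)) cs)^[t] xs)
      (f * (1 - PowerSeries.X ^ nI.toNat) ^ t) := by
  intro t
  induction t with
  | zero => intro xs f h; simpa using h
  | succ t ih =>
    intro xs f h
    rw [Function.iterate_succ_apply]
    refine pvRep_congr (ih _ _ (pvAStepRep W nI h1 h2 xs f h)) ?_
    ring

lemma pvE_succ (u : ℕ) :
    pvE (u + 1) = pvE u * (1 - (PowerSeries.X : PowerSeries ℤ) ^ (u + 1)) := by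
  unfold pvE
  rw [Finset.prod_Icc_succ_top (by omega)]

lemma pvAFoldRep (W : ℕ) (dI : Int) : ∀ (u : ℕ), u ≤ W → ∀ (xs : List Int) (f : PowerSeries ℤ),
    pvRep W xs f →
    pvRep W ((PySem.List.pyRange 1 ((u : Int) + 1) 1).foldl (fun coeffs n =>
        (PySem.List.pyRange 0 dI 1).foldl (fun coeffs _ =>
          (PySem.List.pyRange (W : Int) (n - 1) (-1)).foldl (fun cs j =>
            PySem.List.pySetD cs j
              (PySem.List.pyGetD cs j 0 - PySem.List.pyGetD cs (j - n) 0)) coeffs) coeffs) xs)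
      (f * (pvE u) ^ dI.toNat) := by
  intro u
  induction u with
  | zero =>
    intro _ xs f h
    rw [PySem.List.pyRange_one_eq_nil (by omega : ((0 : ℕ) : Int) + 1 ≤ 1)]
    refine pvRep_congr h ?_
    simp [pvE]
  | succ u ih =>
    intro hu xs f h
    have hsplit : ((u + 1 : ℕ) : Int) + 1 = ((u : Int) + 1) + 1 := by push_cast; ring
    rw [hsplit, PySem.List.pyRange_one_succ_right (a := 1) (b := (u : Int) + 1) (by omega), List.foldl_append, List.foldl_cons,
        List.foldl_nil]
    have hrec := ih (by omega) xs f h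
    rw [pvIterFold, PySem.List.length_pyRange_one]
    have hstep := pvAIterRep W ((u : Int) + 1) (by omega) (by omega)
      (dI - 0).toNat _ _ hrec
    refine pvRep_congr hstep ?_
    have h1 : (((u : Int) + 1)).toNat = u + 1 := by omega
    have h2 : (dI - 0).toNat = dI.toNat := by omega
    rw [h1, h2, pvE_succ, mul_pow]
    ring

-- the starting list [1, 0, ..., 0] represents 1
lemma pvOneRep (W : ℕ) : pvRep W (1 :: List.replicate W 0) 1 := by
  refine ⟨by simp, ?_⟩
  intro k hk
  cases k with
  | zero => simp [pvC]
  | succ k =>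
    simp only [pvC, List.getD_cons_succ, PowerSeries.coeff_one, Nat.succ_ne_zero, if_false]
    rw [List.getD_eq_getElem?_getD]
    rcases lt_or_ge k W with h | h
    · simp [h]
    · rw [List.getElem?_eq_none (by simpa using h)]
      rfl

-- A's result represents pvE^(d.toNat)
lemma pvARep (d : Int) (max_wt : Int) (h : 0 ≤ max_wt) :
    pvRep max_wt.toNat (eta_power d max_wt) (pvE max_wt.toNat ^ d.toNat) := by
  obtain ⟨W, rfl⟩ : ∃ W : ℕ, max_wt = (W : Int) := ⟨max_wt.toNat, (Int.toNat_of_nonneg h).symm⟩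
  unfold eta_power
  have hrepl : ((W : Int) + 1).toNat = W + 1 := by omega
  have hinit : PySem.List.pySetD (List.replicate ((W : Int) + 1).toNat (0 : Int)) 0 1 =
      1 :: List.replicate W 0 := by
    rw [PySem.List.pySetD_of_nonneg _ _ (by omega), hrepl, List.replicate_succ]
    rfl
  rw [hinit]
  have h1 := pvAFoldRep W d W (le_refl W) _ _ (pvOneRep W)
  have h2 := pvRep_congr h1 (one_mul _)
  rw [Int.toNat_natCast]
  exact h2

-- pvMul multiplies representations
lemma pvMulRep (W : ℕ) (a b : List Int) (f g : PowerSeries ℤ)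
    (ha : pvRep W a f) (hb : pvRep W b g) : pvRep W (pvMul a b) (f * g) := by
  obtain ⟨ha1, ha2⟩ := ha
  obtain ⟨hb1, hb2⟩ := hb
  simp only [pvC] at ha2 hb2
  unfold pvMul
  rw [PySem.List.pyRange_zero_nat, List.map_map]
  refine ⟨by simp [ha1], ?_⟩
  intro k hk
  unfold pvC
  rw [pvGetD_map_range (by omega)]
  simp only [Function.comp_apply, Int.toNat_natCast]
  rw [PowerSeries.coeff_mul, Finset.Nat.sum_antidiagonal_eq_sum_range_succ_mk]
  refine Finset.sum_congr rfl ?_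
  intro i hi
  have hik : i ≤ k := by simpa [Nat.lt_succ_iff] using hi
  have hcast : (k : Int) - (i : Int) = ((k - i : ℕ) : Int) := by omega
  rw [PySem.List.pyGetD_natCast, hcast, PySem.List.pyGetD_natCast,
      ha2 i (by omega), hb2 (k - i) (by omega)]

-- the binary-exponentiation loop computes f * g^(e.toNat)
lemma pvPowLoopRep (W : ℕ) : ∀ (m : ℕ) (e : Int) (r b : List Int) (f g : PowerSeries ℤ),
    e.toNat = m → pvRep W r f → pvRep W b g →
    pvRep W (pvPowLoop r b e) (f * g ^ e.toNat) := by
  intro m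
  induction m using Nat.strong_induction_on with
  | _ m IH =>
    intro e r b f g hm hr hb
    rw [pvPowLoop]
    by_cases he : 0 < e
    · rw [if_pos he]
      have hfd : PySem.Int.floordiv e 2 = e / 2 := PySem.Int.floordiv_eq_ediv_of_pos (by omega)
      have hmd : PySem.Int.mod e 2 = e % 2 := PySem.Int.mod_eq_emod_of_pos (by omega)
      have h2 : (e / 2).toNat < m := by omega
      have harith : e.toNat = 2 * (e / 2).toNat + (e % 2).toNat := by omega
      by_cases hodd : PySem.Int.mod e 2 ≠ 0
      · rw [if_pos hodd, hfd]
        have hrec := IH _ h2 (e / 2) (pvMul r b) (pvMul b b) (f * g) (g * g) rfl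
          (pvMulRep W r b f g hr hb) (pvMulRep W b b g g hb hb)
        refine pvRep_congr hrec ?_
        have hone : (e % 2).toNat = 1 := by rw [hmd] at hodd; omega
        rw [harith, hone]
        ring
      · rw [if_neg hodd, hfd]
        have hrec := IH _ h2 (e / 2) r (pvMul b b) f (g * g) rfl hr
          (pvMulRep W b b g g hb hb)
        refine pvRep_congr hrec ?_
        have hzero : (e % 2).toNat = 0 := by
          rw [hmd] at hodd; omega
        rw [harith, hzero]
        ring
    · rw [if_neg he]
      have h0 : e.toNat = 0 := by omega
      rw [h0, pow_zero, mul_one]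
      exact hr

-- B's per-factor comprehension step
lemma pvBStepRep (W : ℕ) (nI : Int) (h1 : 1 ≤ nI) (h2 : nI ≤ (W : Int))
    (b : List Int) (f : PowerSeries ℤ) (h : pvRep W b f) :
    pvRep W ((PySem.List.pyRange 0 ((W : Int) + 1) 1).map (fun k =>
        PySem.List.pyGetD b k 0 - if nI ≤ k then PySem.List.pyGetD b (k - nI) 0 else 0))
      (f * (1 - PowerSeries.X ^ nI.toNat)) := by
  obtain ⟨nn, rfl⟩ : ∃ nn : ℕ, nI = (nn : Int) := ⟨nI.toNat, (Int.toNat_of_nonneg (by omega)).symm⟩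
  have hcast : (W : Int) + 1 = ((W + 1 : ℕ) : Int) := by push_cast; ring
  rw [hcast, PySem.List.pyRange_zero_nat, List.map_map]
  have hmap : (List.range (W + 1)).map ((fun k =>
        PySem.List.pyGetD b k 0 - if (nn : Int) ≤ k then PySem.List.pyGetD b (k - (nn : Int)) 0 else 0) ∘
        (fun (k : ℕ) => (k : Int))) =
      (List.range b.length).map (fun k =>
        b.getD k 0 - if (nn : Int) ≤ (k : Int) ∧ (k : Int) ≤ (W : Int) then b.getD ((k : Int) - (nn : Int)).toNat 0 else 0) := by
    rw [h.1]
    refine List.map_congr_left ?_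
    intro k hkmem
    have hkW : k ≤ W := by simpa [Nat.lt_succ_iff] using hkmem
    simp only [Function.comp_apply, PySem.List.pyGetD_natCast]
    by_cases hc : nn ≤ k
    · rw [if_pos (by exact_mod_cast hc), if_pos ⟨by exact_mod_cast hc, by exact_mod_cast hkW⟩,
          PySem.List.pyGetD_of_nonneg b 0 (by omega)]
    · rw [if_neg (by exact_mod_cast hc), if_neg (by omega)]
  rw [hmap]
  have := pvStepRep W nn b f h
  simpa using this

lemma pvBFoldRep (W : ℕ) : ∀ (u : ℕ), u ≤ W → ∀ (b : List Int) (f : PowerSeries ℤ),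
    pvRep W b f →
    pvRep W ((PySem.List.pyRange 1 ((u : Int) + 1) 1).foldl (fun b n =>
        (PySem.List.pyRange 0 ((W : Int) + 1) 1).map (fun k =>
          PySem.List.pyGetD b k 0 - if n ≤ k then PySem.List.pyGetD b (k - n) 0 else 0)) b)
      (f * pvE u) := by
  intro u
  induction u with
  | zero =>
    intro _ b f h
    rw [PySem.List.pyRange_one_eq_nil (by omega : ((0 : ℕ) : Int) + 1 ≤ 1)]
    refine pvRep_congr h ?_
    simp [pvE]
  | succ u ih =>
    intro hu b f h
    have hsplit : ((u + 1 : ℕ) : Int) + 1 = ((u : Int) + 1) + 1 := by push_cast; ring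
    rw [hsplit, PySem.List.pyRange_one_succ_right (a := 1) (b := (u : Int) + 1) (by omega), List.foldl_append, List.foldl_cons,
        List.foldl_nil]
    have hstep := pvBStepRep W ((u : Int) + 1) (by omega) (by omega) _ _
      (ih (by omega) b f h)
    refine pvRep_congr hstep ?_
    have h1 : (((u : Int) + 1)).toNat = u + 1 := by omega
    rw [h1, pvE_succ]
    ring

-- B's result represents pvE^(d.toNat)
lemma pvBRep (d : Int) (max_wt : Int) (h : 0 ≤ max_wt) :
    pvRep max_wt.toNat (eta_power_alt d max_wt) (pvE max_wt.toNat ^ d.toNat) := by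
  obtain ⟨W, rfl⟩ : ∃ W : ℕ, max_wt = (W : Int) := ⟨max_wt.toNat, (Int.toNat_of_nonneg h).symm⟩
  unfold eta_power_alt
  simp only [Int.toNat_natCast]
  by_cases hd : d ≤ 0
  · rw [if_pos hd]
    have h0 : d.toNat = 0 := by omega
    rw [h0, pow_zero]
    exact pvOneRep W
  · rw [if_neg hd]
    have hbase := pvBFoldRep W W (le_refl W) (1 :: List.replicate W 0) 1 (pvOneRep W)
    have hbase' := pvRep_congr hbase (one_mul _)
    have hfin := pvPowLoopRep W d.toNat d (1 :: List.replicate W 0) _ 1 (pvE W) rfl (pvOneRep W) hbase'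
    exact pvRep_congr hfin (one_mul _)

lemma pvRep_ext (W : ℕ) (xs ys : List Int) (f : PowerSeries ℤ)
    (hx : pvRep W xs f) (hy : pvRep W ys f) : xs = ys := by
  refine List.ext_getElem (by rw [hx.1, hy.1]) ?_
  intro k hk1 hk2
  have hkW : k ≤ W := by rw [hx.1] at hk1; omega
  have h1 := hx.2 k hkW
  have h2 := hy.2 k hkW
  unfold pvC at h1 h2
  rw [List.getD_eq_getElem _ _ hk1] at h1
  rw [List.getD_eq_getElem _ _ hk2] at h2
  rw [h1, h2]

-- ===== VERDICT (by name: the statement is the Claim_ definition above) =====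
theorem eta_power_spec : Claim_equal_eta_power := by
  intro d max_wt _ hpre
  unfold Spec_eta_power
  exact pvRep_ext _ _ _ _ (pvARep d max_wt hpre) (pvBRep d max_wt hpre)
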